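-- pv_equiv track=rewrite | github.com/thenatzzz/Machine_Learning_CMPT-726 | assignment-2/a2_datacode/code/P6/create_html_table.py | create_table_html
-- ===== SOURCE A (Python) =====
-- IMAGE_FOLDER = 'sample_test_image'
--
-- def create_table_html(input_filename_list):
--     list = []
--     NUM_IMAGE = len(input_filename_list)
--     pic_per_row = 13 #14
--     num_row = 200 #715
--
--     count =0
--     for i in range(0,num_row):
--         list_per_row = []
--         for j in range(0,pic_per_row):
--             if count == NUM_IMAGE:
--                 break
--             pic = "<img src="+IMAGE_FOLDER+"/"+input_filename_list[count]+">"
--             list_per_row.append(pic)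
--             count += 1
--         list.append(list_per_row)
--     return list
-- ===== SOURCE B (Python) =====
-- IMAGE_FOLDER = 'sample_test_image'
--
-- def create_table_html(input_filename_list):
--     tags = ["<img src=" + IMAGE_FOLDER + "/" + f + ">" for f in input_filename_list[:2600]]
--     rows = []
--     while tags:
--         rows.append(tags[:13])
--         tags = tags[13:]
--     rows += [[] for _ in range(200 - len(rows))]
--     return rows
-- ===== Notes on version B (the rewrite author's own statement) =====
-- stated objective: simpler
-- what changed: Replaced the nested counter/break loops over a fixed 200x13 grid by a three-pass decomposition: format all tags once (truncated to 2600), chunk the tag list by slicing, then pad with empty rows to 200.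
import Mathlib
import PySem

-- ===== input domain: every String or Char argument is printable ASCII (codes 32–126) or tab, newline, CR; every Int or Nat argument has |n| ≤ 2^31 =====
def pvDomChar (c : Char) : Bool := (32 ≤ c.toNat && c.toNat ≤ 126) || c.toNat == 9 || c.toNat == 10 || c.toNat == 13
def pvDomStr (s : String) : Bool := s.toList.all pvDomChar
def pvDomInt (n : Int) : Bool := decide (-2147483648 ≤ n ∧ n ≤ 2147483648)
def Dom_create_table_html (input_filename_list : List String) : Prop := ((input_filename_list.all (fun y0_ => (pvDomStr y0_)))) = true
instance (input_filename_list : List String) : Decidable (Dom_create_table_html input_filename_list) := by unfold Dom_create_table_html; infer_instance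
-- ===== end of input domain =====

-- B changes only the decomposition (format once, chunk by slicing, pad to 200 rows); same return value.

-- ===== PORT A =====
-- the tag expression "<img src=" + IMAGE_FOLDER + "/" + f + ">" (shared by both ports verbatim)
def pvMkTag (f : String) : String := "<img src=" ++ "sample_test_image" ++ "/" ++ f ++ ">"

-- inner loop: for j in range(0,13): if count == NUM_IMAGE: break; append tag; count += 1
-- returns the final count and the row.  The `none` branch of pyGet? is Python's
-- IndexError; it is unreachable because the loop guards count == len first.
def pvAInner (l : List String) : Nat → Nat → List String → (Nat × List String)
  | 0, count, acc => (count, acc.reverse)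
  | j + 1, count, acc =>
      if count = l.length then (count, acc.reverse)
      else
        match PySem.List.pyGet? l (count : Int) with
        | some f => pvAInner l j (count + 1) (pvMkTag f :: acc)
        | none => (count, acc.reverse)

-- outer loop: for i in range(0,200): run the inner loop, append the row
def pvAOuter (l : List String) : Nat → Nat → List (List String) → List (List String)
  | 0, _, acc => acc.reverse
  | n + 1, count, acc =>
      let r := pvAInner l 13 count []
      pvAOuter l n r.1 (r.2 :: acc)

def create_table_html (input_filename_list : List String) : List (List String) :=
  pvAOuter input_filename_list 200 0 []

-- ===== PORT B =====
-- while tags: rows.append(tags[:13]); tags = tags[13:]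
def pvChunk13 (ts : List String) : List (List String) :=
  if ts.isEmpty then [] else ts.take 13 :: pvChunk13 (ts.drop 13)
  termination_by ts.length
  decreasing_by
    simp only [List.length_drop]
    cases ts with
    | nil => simp_all
    | cons a t => simp

def create_table_html_alt (input_filename_list : List String) : List (List String) :=
  let tags := (input_filename_list.take 2600).map pvMkTag
  let rows := pvChunk13 tags
  rows ++ List.replicate (200 - rows.length) []

-- ===== PRECONDITION & SPEC =====
def Spec_create_table_html (input_filename_list : List String) (out : List (List String)) : Prop := out = create_table_html_alt input_filename_list
instance (input_filename_list : List String) (out : List (List String)) : Decidable (Spec_create_table_html input_filename_list out) := by unfold Spec_create_table_html; infer_instance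

-- ===== CLAIM (what is proved, stated in full; the proofs are below) =====
def Claim_equal_create_table_html : Prop := ∀ (input_filename_list : List String), Dom_create_table_html input_filename_list → Spec_create_table_html input_filename_list (create_table_html input_filename_list)

-- ===== LEMMAS AND PROOFS =====

-- canonical form: n rows, row k = take 13 of drop 13k
def pvCanon (ts : List String) : Nat → List (List String)
  | 0 => []
  | n + 1 => ts.take 13 :: pvCanon (ts.drop 13) n

lemma pvCanon_nil (n : Nat) : pvCanon [] n = List.replicate n [] := by
  induction n with
  | zero => rfl
  | succ n ih => simp [pvCanon, ih, List.replicate_succ]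

lemma pvCanon_take (ts : List String) (n : Nat) :
    pvCanon (ts.take (13 * n)) n = pvCanon ts n := by
  induction n generalizing ts with
  | zero => rfl
  | succ n ih =>
      simp only [pvCanon]
      congr 1
      · rw [List.take_take]; congr 1
      · rw [List.drop_take]
        have : 13 * (n + 1) - 13 = 13 * n := by ring_nf; omega
        rw [this, ih]

lemma pvAInner_eq (l : List String) (j : Nat) :
    ∀ (c : Nat) (acc : List String), c ≤ l.length →
    pvAInner l j c acc =
      (min (c + j) l.length, acc.reverse ++ ((l.map pvMkTag).drop c).take j) := by
  induction j with
  | zero =>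
      intro c acc hc
      simp [pvAInner]; omega
  | succ j ih =>
      intro c acc hc
      by_cases h : c = l.length
      · subst h
        simp [pvAInner]
      · have hlt : c < l.length := lt_of_le_of_ne hc h
        have hget : PySem.List.pyGet? l (c : Int) = some l[c] := by
          rw [PySem.List.pyGet?_natCast]
          exact List.getElem?_eq_getElem hlt
        simp only [pvAInner, if_neg h, hget]
        rw [ih (c + 1) _ (by omega)]
        have hdrop : (l.map pvMkTag).drop c = pvMkTag l[c] :: (l.map pvMkTag).drop (c + 1) := by
          rw [List.drop_eq_getElem_cons (by simpa using hlt)]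
          simp
        rw [hdrop]
        simp [List.take_succ_cons]
        omega

lemma pvAOuter_eq (l : List String) (n : Nat) :
    ∀ (c : Nat) (acc : List (List String)), c ≤ l.length →
    pvAOuter l n c acc = acc.reverse ++ pvCanon ((l.map pvMkTag).drop c) n := by
  induction n with
  | zero => intro c acc hc; simp [pvAOuter, pvCanon]
  | succ n ih =>
      intro c acc hc
      simp only [pvAOuter]
      rw [pvAInner_eq l 13 c [] hc]
      rw [ih (min (c + 13) l.length) _ (by omega)]
      have hdd : (l.map pvMkTag).drop (min (c + 13) l.length) = ((l.map pvMkTag).drop c).drop 13 := by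
        rw [List.drop_drop]
        by_cases h13 : c + 13 ≤ l.length
        · congr 1; omega
        · rw [List.drop_eq_nil_of_le, List.drop_eq_nil_of_le] <;> simp <;> omega
      rw [hdd]
      simp [pvCanon, List.nil_append]

lemma pvChunk13_pad (n : Nat) :
    ∀ ts : List String, ts.length ≤ 13 * n →
    pvChunk13 ts ++ List.replicate (n - (pvChunk13 ts).length) [] = pvCanon ts n := by
  induction n with
  | zero =>
      intro ts h
      have : ts = [] := by
        cases ts with
        | nil => rfl
        | cons a t => simp at h
      subst this
      simp [pvChunk13, pvCanon]
  | succ n ih =>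
      intro ts h
      by_cases he : ts.isEmpty
      · have : ts = [] := by simpa [List.isEmpty_iff] using he
        subst this
        rw [pvChunk13]
        simp [pvCanon_nil, List.replicate_succ, pvCanon]
      · rw [pvChunk13, if_neg he]
        have hlen : (ts.drop 13).length ≤ 13 * n := by
          simp only [List.length_drop]; omega
        simp only [pvCanon, List.length_cons, List.cons_append]
        rw [show n + 1 - ((pvChunk13 (ts.drop 13)).length + 1) = n - (pvChunk13 (ts.drop 13)).length by omega]
        rw [ih (ts.drop 13) hlen]

lemma pvA_canon (l : List String) :
    create_table_html l = pvCanon (l.map pvMkTag) 200 := by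
  unfold create_table_html
  rw [pvAOuter_eq l 200 0 [] (Nat.zero_le _)]
  simp

lemma pvB_canon (l : List String) :
    create_table_html_alt l = pvCanon (l.map pvMkTag) 200 := by
  unfold create_table_html_alt
  simp only
  have h1 : (l.take 2600).map pvMkTag = (l.map pvMkTag).take 2600 := by
    rw [List.map_take]
  rw [h1]
  have h2 : ((l.map pvMkTag).take 2600).length ≤ 13 * 200 := by
    simp
  rw [pvChunk13_pad 200 _ h2]
  have : (13 * 200 : Nat) = 2600 := by norm_num
  rw [← this, pvCanon_take]

-- ===== VERDICT (by name: the statement is the Claim_ definition above) =====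
theorem create_table_html_spec : Claim_equal_create_table_html := by
  intro l _
  unfold Spec_create_table_html
  rw [pvA_canon, pvB_canon]
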